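-- pv_equiv track=rewrite | github.com/adarsh-aur/Trinetra-GNN | backend/app.py | fallback_categorize_node
-- ===== SOURCE A (Python) =====
-- def fallback_categorize_node(node_type, node_id, detected_cloud):
--     """Fallback categorization"""
--     identifier = f"{node_type}_{node_id}".lower()
--
--     if any(x in identifier for x in ["network", "ip", "subnet"]):
--         return "network"
--     elif any(x in identifier for x in ["compute", "vm", "process"]):
--         return "compute"
--     elif any(x in identifier for x in ["database", "db", "sql", "postgres", "mysql"]):
--         return "database"
--     elif any(x in identifier for x in ["security", "auth"]):
--         return "security"
--     return "other"
-- ===== SOURCE B (Python) =====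
-- # B: single left-to-right scan over the identifier; at each position it prefix-matches
-- # the keywords starting there and keeps the best (lowest) category priority seen.
-- KEYWORD_PRIORITY = [
--     ("network", 0), ("ip", 0), ("subnet", 0),
--     ("compute", 1), ("vm", 1), ("process", 1),
--     ("database", 2), ("db", 2), ("sql", 2), ("postgres", 2), ("mysql", 2),
--     ("security", 3), ("auth", 3),
-- ]
-- CATEGORIES = ["network", "compute", "database", "security"]
--
-- def fallback_categorize_node(node_type, node_id, detected_cloud):
--     identifier = f"{node_type}_{node_id}".lower()
--     best = 4
--     for i in range(len(identifier)):
--         for kw, prio in KEYWORD_PRIORITY: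
--             if prio < best and identifier.startswith(kw, i):
--                 best = prio
--     return CATEGORIES[best] if best < 4 else "other"
-- ===== Notes on version B (the rewrite author's own statement) =====
-- stated objective: alternative
-- what changed: Instead of running a separate substring search per keyword per branch, B makes one left-to-right scan over the identifier, prefix-matching the keyword table at each position and keeping the minimum category priority found, then maps that priority to the category name.
import Mathlib
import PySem

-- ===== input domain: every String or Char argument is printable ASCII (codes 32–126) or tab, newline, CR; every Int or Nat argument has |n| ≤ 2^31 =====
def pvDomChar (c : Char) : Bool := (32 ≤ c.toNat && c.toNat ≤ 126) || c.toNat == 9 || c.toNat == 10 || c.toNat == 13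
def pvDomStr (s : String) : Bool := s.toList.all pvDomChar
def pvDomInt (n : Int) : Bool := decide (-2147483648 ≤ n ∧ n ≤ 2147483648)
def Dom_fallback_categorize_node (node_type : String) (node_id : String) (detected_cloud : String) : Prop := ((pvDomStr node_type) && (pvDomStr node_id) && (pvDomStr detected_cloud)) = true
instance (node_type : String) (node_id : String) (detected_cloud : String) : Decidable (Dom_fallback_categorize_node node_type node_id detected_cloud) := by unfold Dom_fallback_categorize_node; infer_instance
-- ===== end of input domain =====

-- B replaces A's per-keyword substring searches by one positional scan of the identifier that prefix-matches a flat keyword-priority table and keeps the minimum priority (alternative algorithm; same cost).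


-- ===== PORT A =====
def fallback_categorize_node (node_type : String) (node_id : String) (detected_cloud : String) : String :=
  let identifier := PySem.Chars.lower (node_type.toList ++ '_' :: node_id.toList)
  if ["network", "ip", "subnet"].any (fun x => PySem.Chars.isIn x.toList identifier) then "network"
  else if ["compute", "vm", "process"].any (fun x => PySem.Chars.isIn x.toList identifier) then "compute"
  else if ["database", "db", "sql", "postgres", "mysql"].any (fun x => PySem.Chars.isIn x.toList identifier) then "database"
  else if ["security", "auth"].any (fun x => PySem.Chars.isIn x.toList identifier) then "security"
  else "other"

-- ===== PORT B =====
-- B: one positional scan of the identifier, prefix-matching a flat (keyword, priority) table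
-- at each index and keeping the minimum priority; identifier.startswith(kw, i) with
-- 0 <= i is exactly kw.isPrefixOf (identifier.drop i).
def pvKw : List (List Char × Nat) :=
  [("network".toList, 0), ("ip".toList, 0), ("subnet".toList, 0),
   ("compute".toList, 1), ("vm".toList, 1), ("process".toList, 1),
   ("database".toList, 2), ("db".toList, 2), ("sql".toList, 2), ("postgres".toList, 2), ("mysql".toList, 2),
   ("security".toList, 3), ("auth".toList, 3)]

def fallback_categorize_node_alt (node_type : String) (node_id : String) (detected_cloud : String) : String :=
  let identifier := PySem.Chars.lower (node_type.toList ++ '_' :: node_id.toList)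
  let best := (List.range identifier.length).foldl
      (fun b i => pvKw.foldl
        (fun b' p => if decide (p.2 < b') && p.1.isPrefixOf (identifier.drop i) then p.2 else b') b) 4
  if best < 4 then ["network", "compute", "database", "security"].getD best "other" else "other"

-- ===== PRECONDITION & SPEC =====
def Spec_fallback_categorize_node (node_type : String) (node_id : String) (detected_cloud : String) (out : String) : Prop := out = fallback_categorize_node_alt node_type node_id detected_cloud
instance (node_type : String) (node_id : String) (detected_cloud : String) (out : String) : Decidable (Spec_fallback_categorize_node node_type node_id detected_cloud out) := by unfold Spec_fallback_categorize_node; infer_instance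

-- ===== CLAIM (what is proved, stated in full; the proofs are below) =====
def Claim_equal_fallback_categorize_node : Prop := ∀ (node_type : String) (node_id : String) (detected_cloud : String), Dom_fallback_categorize_node node_type node_id detected_cloud → Spec_fallback_categorize_node node_type node_id detected_cloud (fallback_categorize_node node_type node_id detected_cloud)

-- ===== LEMMAS AND PROOFS =====

-- the inner fold of B (scan of the keyword table at one position, t = identifier.drop i)
def pvInner (t : List Char) (b : Nat) : Nat :=
  pvKw.foldl (fun b' p => if decide (p.2 < b') && p.1.isPrefixOf t then p.2 else b') b

-- B's whole scan, abstracted over the string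
def pvBest (s : List Char) : Nat :=
  (List.range s.length).foldl (fun b i => pvInner (s.drop i) b) 4

-- generic facts about the inner fold, proved for an arbitrary table l
theorem pvInnerG_le (l : List (List Char × Nat)) (t : List Char) (b : Nat) :
    l.foldl (fun b' p => if decide (p.2 < b') && p.1.isPrefixOf t then p.2 else b') b ≤ b := by
  induction l generalizing b with
  | nil => simp
  | cons q l ih =>
    simp only [List.foldl_cons]
    refine le_trans (ih _) ?_
    split <;> simp_all <;> omega

theorem pvInnerG_le_of_mem (l : List (List Char × Nat)) (t : List Char) (b : Nat)
    (kw : List Char) (p : Nat) (hm : (kw, p) ∈ l) (hp : kw.isPrefixOf t = true) :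
    l.foldl (fun b' p => if decide (p.2 < b') && p.1.isPrefixOf t then p.2 else b') b ≤ p := by
  induction l generalizing b with
  | nil => simp at hm
  | cons q l ih =>
    simp only [List.foldl_cons]
    rcases List.mem_cons.mp hm with h | h
    · subst h
      refine le_trans (pvInnerG_le l t _) ?_
      simp only [hp, Bool.and_true]
      split <;> simp_all
    · exact ih _ h

theorem pvInnerG_cases (l : List (List Char × Nat)) (t : List Char) (b : Nat) :
    l.foldl (fun b' p => if decide (p.2 < b') && p.1.isPrefixOf t then p.2 else b') b = b ∨
    ∃ kw p, (kw, p) ∈ l ∧ kw.isPrefixOf t = true ∧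
      l.foldl (fun b' p => if decide (p.2 < b') && p.1.isPrefixOf t then p.2 else b') b = p := by
  induction l generalizing b with
  | nil => left; rfl
  | cons q l ih =>
    simp only [List.foldl_cons]
    rcases ih (if decide (q.2 < b) && q.1.isPrefixOf t then q.2 else b) with h | ⟨kw, p, hm, hp, he⟩
    · by_cases hq : (decide (q.2 < b) && q.1.isPrefixOf t) = true
      · right
        exact ⟨q.1, q.2, List.mem_cons_self, (by simp only [Bool.and_eq_true] at hq; exact hq.2), by simp [hq] at h; simpa [hq] using h⟩
      · left; simpa [hq] using h
    · right; exact ⟨kw, p, List.mem_cons_of_mem _ hm, hp, he⟩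

-- lift to the outer fold over an arbitrary index list
theorem pvOuter_le (L : List Nat) (s : List Char) (b : Nat) :
    L.foldl (fun b i => pvInner (s.drop i) b) b ≤ b := by
  induction L generalizing b with
  | nil => simp
  | cons i L ih =>
    simp only [List.foldl_cons]
    exact le_trans (ih _) (pvInnerG_le _ _ _)

theorem pvOuter_le_of (L : List Nat) (s : List Char) (b : Nat)
    (i : Nat) (kw : List Char) (p : Nat)
    (hi : i ∈ L) (hm : (kw, p) ∈ pvKw) (hp : kw.isPrefixOf (s.drop i) = true) :
    L.foldl (fun b i => pvInner (s.drop i) b) b ≤ p := by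
  induction L generalizing b with
  | nil => simp at hi
  | cons j L ih =>
    simp only [List.foldl_cons]
    rcases List.mem_cons.mp hi with h | h
    · subst h
      exact le_trans (pvOuter_le L s _) (pvInnerG_le_of_mem _ _ _ _ _ hm hp)
    · exact ih _ h

theorem pvOuter_cases (L : List Nat) (s : List Char) (b : Nat) :
    L.foldl (fun b i => pvInner (s.drop i) b) b = b ∨
    ∃ i kw p, i ∈ L ∧ (kw, p) ∈ pvKw ∧ kw.isPrefixOf (s.drop i) = true ∧
      L.foldl (fun b i => pvInner (s.drop i) b) b = p := by
  induction L generalizing b with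
  | nil => left; rfl
  | cons j L ih =>
    simp only [List.foldl_cons]
    rcases ih (pvInner (s.drop j) b) with h | ⟨i, kw, p, hi, hm, hp, he⟩
    · rcases pvInnerG_cases pvKw (s.drop j) b with h' | ⟨kw, p, hm, hp, he⟩
      · left; rw [h]; exact h'
      · right; exact ⟨j, kw, p, List.mem_cons_self, hm, hp, by rw [h]; exact he⟩
    · right; exact ⟨i, kw, p, List.mem_cons_of_mem _ hi, hm, hp, he⟩

-- every table keyword is nonempty
theorem pvKw_ne_nil : ∀ q ∈ pvKw, q.1 ≠ ([] : List Char) := by decide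

-- substring occurrence of a table keyword forces the scan's minimum down to its priority
theorem pvBest_le (s : List Char) (kw : List Char) (p : Nat)
    (hm : (kw, p) ∈ pvKw) (hin : PySem.Chars.isIn kw s = true) : pvBest s ≤ p := by
  obtain ⟨j, hj⟩ := (PySem.Chars.exists_prefix_drop_iff_isIn kw s).mpr hin
  have hjlt : j < s.length := by
    by_contra h
    have : s.drop j = [] := List.drop_eq_nil_of_le (by omega)
    rw [this] at hj
    exact pvKw_ne_nil _ hm (List.prefix_nil.mp hj)
  exact pvOuter_le_of _ s 4 j kw p (List.mem_range.mpr hjlt)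
    hm (List.isPrefixOf_iff_prefix.mpr hj)

-- conversely, the scan's result is 4 or the priority of some keyword occurring in s
theorem pvBest_cases (s : List Char) :
    pvBest s = 4 ∨ ∃ kw p, (kw, p) ∈ pvKw ∧ PySem.Chars.isIn kw s = true ∧ pvBest s = p := by
  rcases pvOuter_cases (List.range s.length) s 4 with h | ⟨i, kw, p, _, hm, hp, he⟩
  · left; exact h
  · right
    refine ⟨kw, p, hm, ?_, he⟩
    exact (PySem.Chars.exists_prefix_drop_iff_isIn kw s).mp ⟨i, List.isPrefixOf_iff_prefix.mp hp⟩

-- a matched table keyword makes the corresponding group's `any` true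
theorem pvGroup_of_mem (s kw : List Char) (p : Nat)
    (hm : (kw, p) ∈ pvKw) (hin : PySem.Chars.isIn kw s = true) :
    (p = 0 ∧ (["network", "ip", "subnet"].any fun x => PySem.Chars.isIn x.toList s) = true) ∨
    (p = 1 ∧ (["compute", "vm", "process"].any fun x => PySem.Chars.isIn x.toList s) = true) ∨
    (p = 2 ∧ (["database", "db", "sql", "postgres", "mysql"].any fun x => PySem.Chars.isIn x.toList s) = true) ∨
    (p = 3 ∧ (["security", "auth"].any fun x => PySem.Chars.isIn x.toList s) = true) := by
  simp only [pvKw, List.mem_cons, List.not_mem_nil, or_false, Prod.mk.injEq] at hm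
  rcases hm with ⟨h1, h2⟩ | ⟨h1, h2⟩ | ⟨h1, h2⟩ | ⟨h1, h2⟩ | ⟨h1, h2⟩ | ⟨h1, h2⟩ | ⟨h1, h2⟩ | ⟨h1, h2⟩ | ⟨h1, h2⟩ | ⟨h1, h2⟩ | ⟨h1, h2⟩ | ⟨h1, h2⟩ | ⟨h1, h2⟩ <;>
    subst h1 <;> subst h2 <;> simp_all [List.any_cons]

-- the positional minimum-priority scan equals A's if/elif cascade, as a Nat
theorem pvBest_eq (s : List Char) :
    pvBest s =
    (if (["network", "ip", "subnet"].any fun x => PySem.Chars.isIn x.toList s) then 0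
     else if (["compute", "vm", "process"].any fun x => PySem.Chars.isIn x.toList s) then 1
     else if (["database", "db", "sql", "postgres", "mysql"].any fun x => PySem.Chars.isIn x.toList s) then 2
     else if (["security", "auth"].any fun x => PySem.Chars.isIn x.toList s) then 3
     else 4) := by
  by_cases h0 : (["network", "ip", "subnet"].any fun x => PySem.Chars.isIn x.toList s) = true
  · obtain ⟨x, hx, hin⟩ := List.any_eq_true.mp h0
    have hle : pvBest s ≤ 0 := by fin_cases hx <;> exact pvBest_le s _ 0 (by decide) hin
    rw [if_pos h0]; omega
  rw [if_neg h0]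
  by_cases h1 : (["compute", "vm", "process"].any fun x => PySem.Chars.isIn x.toList s) = true
  · obtain ⟨x, hx, hin⟩ := List.any_eq_true.mp h1
    have hle : pvBest s ≤ 1 := by fin_cases hx <;> exact pvBest_le s _ 1 (by decide) hin
    have hne : pvBest s ≠ 0 := by
      intro hz
      rcases pvBest_cases s with h | ⟨kw, p, hm, hin', he⟩
      · omega
      · rcases pvGroup_of_mem s kw p hm hin' with ⟨hp, hg⟩ | ⟨hp, _⟩ | ⟨hp, _⟩ | ⟨hp, _⟩
        · exact absurd hg h0
        all_goals omega
    rw [if_pos h1]; omega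
  rw [if_neg h1]
  by_cases h2 : (["database", "db", "sql", "postgres", "mysql"].any fun x => PySem.Chars.isIn x.toList s) = true
  · obtain ⟨x, hx, hin⟩ := List.any_eq_true.mp h2
    have hle : pvBest s ≤ 2 := by fin_cases hx <;> exact pvBest_le s _ 2 (by decide) hin
    have hne : ∀ k, pvBest s = k → k = 2 := by
      intro k hk
      rcases pvBest_cases s with h | ⟨kw, p, hm, hin', he⟩
      · omega
      · rcases pvGroup_of_mem s kw p hm hin' with ⟨hp, hg⟩ | ⟨hp, hg⟩ | ⟨hp, _⟩ | ⟨hp, _⟩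
        · exact absurd hg h0
        · exact absurd hg h1
        all_goals omega
    rw [if_pos h2]; exact hne _ rfl
  rw [if_neg h2]
  by_cases h3 : (["security", "auth"].any fun x => PySem.Chars.isIn x.toList s) = true
  · obtain ⟨x, hx, hin⟩ := List.any_eq_true.mp h3
    have hle : pvBest s ≤ 3 := by fin_cases hx <;> exact pvBest_le s _ 3 (by decide) hin
    have hne : ∀ k, pvBest s = k → k = 3 := by
      intro k hk
      rcases pvBest_cases s with h | ⟨kw, p, hm, hin', he⟩
      · omega
      · rcases pvGroup_of_mem s kw p hm hin' with ⟨hp, hg⟩ | ⟨hp, hg⟩ | ⟨hp, hg⟩ | ⟨hp, _⟩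
        · exact absurd hg h0
        · exact absurd hg h1
        · exact absurd hg h2
        all_goals omega
    rw [if_pos h3]; exact hne _ rfl
  rw [if_neg h3]
  rcases pvBest_cases s with h | ⟨kw, p, hm, hin', he⟩
  · exact h
  · rcases pvGroup_of_mem s kw p hm hin' with ⟨_, hg⟩ | ⟨_, hg⟩ | ⟨_, hg⟩ | ⟨_, hg⟩
    · exact absurd hg h0
    · exact absurd hg h1
    · exact absurd hg h2
    · exact absurd hg h3

-- ===== VERDICT (by name: the statement is the Claim_ definition above) =====
theorem fallback_categorize_node_spec : Claim_equal_fallback_categorize_node := by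
  intro nt nid dc _
  unfold Spec_fallback_categorize_node fallback_categorize_node fallback_categorize_node_alt
  have hb : (List.range (PySem.Chars.lower (nt.toList ++ '_' :: nid.toList)).length).foldl
      (fun b i => pvKw.foldl
        (fun b' p => if decide (p.2 < b') && p.1.isPrefixOf ((PySem.Chars.lower (nt.toList ++ '_' :: nid.toList)).drop i) then p.2 else b') b) 4
      = pvBest (PySem.Chars.lower (nt.toList ++ '_' :: nid.toList)) := rfl
  simp only [hb, pvBest_eq]
  by_cases h0 : (["network", "ip", "subnet"].any fun x => PySem.Chars.isIn x.toList (PySem.Chars.lower (nt.toList ++ '_' :: nid.toList))) = true <;>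
    by_cases h1 : (["compute", "vm", "process"].any fun x => PySem.Chars.isIn x.toList (PySem.Chars.lower (nt.toList ++ '_' :: nid.toList))) = true <;>
      by_cases h2 : (["database", "db", "sql", "postgres", "mysql"].any fun x => PySem.Chars.isIn x.toList (PySem.Chars.lower (nt.toList ++ '_' :: nid.toList))) = true <;>
        by_cases h3 : (["security", "auth"].any fun x => PySem.Chars.isIn x.toList (PySem.Chars.lower (nt.toList ++ '_' :: nid.toList))) = true <;>
          simp [h0, h1, h2, h3]
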